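-- pv_equiv track=rewrite | github.com/OLC-LOC-Bioinformatics/COWSNPhR | cowsnphr_src/tree_methods.py | density_filter_snps
-- ===== SOURCE A (Python) =====
-- def density_filter_snps(group_positions_set, window_size=1000, threshold=2):
--     """
--     Remove any SNPs from regions of a defined window size with two or more SNPs
--     :param group_positions_set: type DICT: Dictionary of species code: group name: reference chromosome: set of
--     group-specific SNP positions
--     :param window_size: type INT: Window size to use when filtering SNPs. Default is 1000
--     :param threshold: type INT: Number of SNPs present within the window to trigger filtering
--     :return: filtered_group_positions: Dictionary of species code: group name: reference chromosome: set of SNP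
--     unfiltered SNP positions
--     """
--     # Divide the window size by two to yield the range to use when filtering putative recombinant SNPs
--     bp_range = int(window_size / 2)
--     # Initialise a dictionary to store the SNPs that pass filter
--     filtered_group_positions = dict()
--     for species, group_dict in group_positions_set.items():
--         # Initialise the species key
--         filtered_group_positions[species] = dict()
--         for group, ref_dict in group_dict.items():
--             # Initialise the group key
--             filtered_group_positions[species][group] = dict()
--             for ref_chrom, pos_list in ref_dict.items():
--                 if ref_chrom not in filtered_group_positions[species][group]:
--                     filtered_group_positions[species][group][ref_chrom] = set()
--                 for pos in pos_list:
--                     # Count of SNPs in range of this SNP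
--                     add_pos = 0
--                     # Simple window of 1001 bp (pos - 500 to pos + 500)
--                     for i in range(pos - bp_range, pos + bp_range):
--                         # If there is another SNP in this range, increment add_pos
--                         if i in pos_list and i != pos:
--                             add_pos += 1
--                     # If the position passes the filter, add it to the dictionary
--                     if add_pos <= threshold:
--                         filtered_group_positions[species][group][ref_chrom].add(pos)
--     return filtered_group_positions
-- ===== SOURCE B (Python) =====
-- def _bisect_left(a, x):
--     """Leftmost insertion point of x in sorted list a (hand-rolled bisect_left)."""
--     lo, hi = 0, len(a)
--     while lo < hi:
--         mid = (lo + hi) // 2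
--         if a[mid] < x:
--             lo = mid + 1
--         else:
--             hi = mid
--     return lo
--
--
-- def density_filter_snps(group_positions_set, window_size=1000, threshold=2):
--     """Same filtering, but each chromosome's distinct positions are sorted once and
--     window neighbours are counted with two binary searches per SNP."""
--     bp_range = int(window_size / 2)
--
--     def filter_chrom(pos_list):
--         srt = sorted(set(pos_list))
--         kept = set()
--         for pos in pos_list:
--             if bp_range > 0:
--                 lo = _bisect_left(srt, pos - bp_range)
--                 hi = _bisect_left(srt, pos + bp_range)
--                 # pos itself is in srt and inside the window: subtract it
--                 neighbours = hi - lo - 1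
--             else:
--                 # empty window: no neighbours
--                 neighbours = 0
--             if neighbours <= threshold:
--                 kept.add(pos)
--         return kept
--
--     return {species: {group: {ref_chrom: filter_chrom(pos_list)
--                               for ref_chrom, pos_list in ref_dict.items()}
--                       for group, ref_dict in group_dict.items()}
--             for species, group_dict in group_positions_set.items()}
-- ===== Notes on version B (the rewrite author's own statement) =====
-- stated objective: faster
-- what changed: Per chromosome B sorts the distinct SNP positions once and counts each SNP's window neighbours with two hand-rolled binary searches, instead of A's scan over every basepair of the window with a membership test per basepair.
import Mathlib
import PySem

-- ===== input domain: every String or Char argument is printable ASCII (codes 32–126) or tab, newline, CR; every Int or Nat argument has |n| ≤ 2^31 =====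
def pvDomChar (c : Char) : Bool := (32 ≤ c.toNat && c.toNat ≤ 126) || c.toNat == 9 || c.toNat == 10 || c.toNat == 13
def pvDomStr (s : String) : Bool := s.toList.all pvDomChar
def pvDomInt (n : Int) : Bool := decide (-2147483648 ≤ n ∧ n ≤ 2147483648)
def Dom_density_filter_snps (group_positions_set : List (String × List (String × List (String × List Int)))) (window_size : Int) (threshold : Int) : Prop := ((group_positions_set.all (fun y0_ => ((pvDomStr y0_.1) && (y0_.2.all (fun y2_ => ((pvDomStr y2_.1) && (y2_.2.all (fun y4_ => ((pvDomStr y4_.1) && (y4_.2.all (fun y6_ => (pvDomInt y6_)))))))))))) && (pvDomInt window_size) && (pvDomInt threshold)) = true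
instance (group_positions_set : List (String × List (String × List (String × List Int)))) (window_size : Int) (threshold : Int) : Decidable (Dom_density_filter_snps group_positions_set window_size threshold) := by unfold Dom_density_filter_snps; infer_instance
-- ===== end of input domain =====

-- B sorts each chromosome's distinct SNP positions once and counts window neighbours
-- with two binary searches per SNP instead of A's scan over every basepair of the window
-- (objective: faster).

-- ===== PORT A =====
-- the nested result dictionaries: chromosome -> SNP set, group -> ..., species -> ...
abbrev pvD1 : Type := PySem.Dict String (PySem.Set Int)
abbrev pvD2 : Type := PySem.Dict String pvD1
abbrev pvD3 : Type := PySem.Dict String pvD2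

-- A's inner window loop: 'for i in range(pos - bp_range, pos + bp_range): if i in pos_list and i != pos: add_pos += 1'
def pvACount (pos_list : List Int) (bp_range pos : Int) : Int :=
  (PySem.List.pyRange (pos - bp_range) (pos + bp_range) 1).foldl
    (fun add_pos i => if i ∈ pos_list ∧ i ≠ pos then add_pos + 1 else add_pos) 0

-- body of A's 'for pos in pos_list' loop
def pvAPos (bp_range threshold : Int) (species group ref_chrom : String) (pos_list : List Int)
    (filtered : pvD3) (pos : Int) : pvD3 :=
  let add_pos := pvACount pos_list bp_range pos
  if add_pos ≤ threshold then
    filtered.modify species PySem.Dict.empty (fun d =>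
      d.modify group PySem.Dict.empty (fun g =>
        g.modify ref_chrom PySem.Set.empty (fun s => PySem.Set.add s pos)))
  else filtered

-- body of A's 'for ref_chrom, pos_list in ref_dict.items()' loop
def pvAChrom (bp_range threshold : Int) (species group : String)
    (filtered : pvD3) (rc : String × List Int) : pvD3 :=
  let filtered :=
    if !((filtered.getD species PySem.Dict.empty).getD group PySem.Dict.empty).contains rc.1 then
      filtered.modify species PySem.Dict.empty (fun d =>
        d.modify group PySem.Dict.empty (fun g => g.insert rc.1 PySem.Set.empty))
    else filtered
  rc.2.foldl (pvAPos bp_range threshold species group rc.1 rc.2) filtered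

-- body of A's 'for group, ref_dict in group_dict.items()' loop
def pvAGroup (bp_range threshold : Int) (species : String)
    (filtered : pvD3) (gr : String × List (String × List Int)) : pvD3 :=
  gr.2.foldl (pvAChrom bp_range threshold species gr.1)
    (filtered.modify species PySem.Dict.empty (fun d => d.insert gr.1 PySem.Dict.empty))

-- body of A's 'for species, group_dict in group_positions_set.items()' loop
def pvASpecies (bp_range threshold : Int)
    (filtered : pvD3) (sp : String × List (String × List (String × List Int))) : pvD3 :=
  sp.2.foldl (pvAGroup bp_range threshold sp.1) (filtered.insert sp.1 PySem.Dict.empty)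

def density_filter_snps (group_positions_set : List (String × List (String × List (String × List Int)))) (window_size : Int) (threshold : Int) : List (String × List (String × List (String × List Int))) :=
  -- bp_range = int(window_size / 2)
  let bp_range := PySem.Int.truncdiv window_size 2
  let filtered := group_positions_set.foldl (pvASpecies bp_range threshold) PySem.Dict.empty
  -- the nested Dict/Set result rendered back as association lists
  filtered.items.map (fun p => (p.1, p.2.items.map (fun q => (q.1, q.2.items.map (fun r => (r.1, r.2))))))

-- ===== PORT B =====
-- hand-rolled bisect_left from Source B ('while lo < hi: mid = (lo + hi) // 2; ...'),
-- the while loop as fuel recursion (hi - lo shrinks every turn, so a.length turns suffice)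
def pvBisectLoop (a : List Int) (x : Int) : Nat → Int → Int → Int
  | 0, lo, _hi => lo
  | fuel + 1, lo, hi =>
    if lo < hi then
      let mid := PySem.Int.floordiv (lo + hi) 2
      if PySem.List.pyGetD a mid 0 < x then pvBisectLoop a x fuel (mid + 1) hi
      else pvBisectLoop a x fuel lo mid
    else lo

def pvBisectLeft (a : List Int) (x : Int) : Int :=
  pvBisectLoop a x a.length 0 (a.length : Int)

-- Source B's filter_chrom
def pvFilterChrom (bp_range threshold : Int) (pos_list : List Int) : PySem.Set Int :=
  let srt := PySem.List.sorted (PySem.Set.ofList pos_list) (fun y => y) false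
  pos_list.foldl (fun kept pos =>
    let neighbours : Int :=
      if bp_range > 0 then
        let lo := pvBisectLeft srt (pos - bp_range)
        let hi := pvBisectLeft srt (pos + bp_range)
        hi - lo - 1
      else 0
    if neighbours ≤ threshold then PySem.Set.add kept pos else kept) PySem.Set.empty

def density_filter_snps_alt (group_positions_set : List (String × List (String × List (String × List Int)))) (window_size : Int) (threshold : Int) : List (String × List (String × List (String × List Int))) :=
  let bp_range := PySem.Int.truncdiv window_size 2
  -- Source B's nested dict comprehensions over the (distinct, by Pre_) keys, as nested maps
  group_positions_set.map (fun p => (p.1, p.2.map (fun q =>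
    (q.1, q.2.map (fun r => (r.1, pvFilterChrom bp_range threshold r.2))))))

-- ===== PRECONDITION & SPEC =====
-- Pre_ excludes association lists that carry duplicate keys at some dict level: Python
-- dicts cannot contain duplicate keys, so the assoc-list behaviour there (A resets the
-- species/group entry and accumulates chromosome entries) is an artefact of the encoding.
def Pre_density_filter_snps (group_positions_set : List (String × List (String × List (String × List Int)))) (window_size : Int) (threshold : Int) : Prop :=
  (group_positions_set.map Prod.fst).Nodup ∧
  ∀ p ∈ group_positions_set, (p.2.map Prod.fst).Nodup ∧ ∀ q ∈ p.2, (q.2.map Prod.fst).Nodup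
instance (group_positions_set : List (String × List (String × List (String × List Int)))) (window_size : Int) (threshold : Int) : Decidable (Pre_density_filter_snps group_positions_set window_size threshold) := by unfold Pre_density_filter_snps; infer_instance

def pvWitness_density_filter_snps : (List (String × List (String × List (String × List Int)))) × Int × Int :=
  ([("s", [("g", [("chr1", [1, 5, 2000])])])], 1000, 2)

-- DecidableEq of the 4-level result type, spelled out (instance search stops one level short)
def pvDecEqOut : DecidableEq (List (String × List (String × List (String × List Int)))) :=
  @instDecidableEqList _ (@instDecidableEqProd _ _ _ (@instDecidableEqList _ (@instDecidableEqProd _ _ _ (@instDecidableEqList _ (@instDecidableEqProd _ _ _ (@instDecidableEqList _ _))))))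

def Spec_density_filter_snps (group_positions_set : List (String × List (String × List (String × List Int)))) (window_size : Int) (threshold : Int) (out : List (String × List (String × List (String × List Int)))) : Prop := out = density_filter_snps_alt group_positions_set window_size threshold
instance (group_positions_set : List (String × List (String × List (String × List Int)))) (window_size : Int) (threshold : Int) (out : List (String × List (String × List (String × List Int)))) : Decidable (Spec_density_filter_snps group_positions_set window_size threshold out) := by unfold Spec_density_filter_snps; exact pvDecEqOut _ _

-- ===== CLAIM (what is proved, stated in full; the proofs are below) =====
def Claim_equal_density_filter_snps : Prop := ∀ (group_positions_set : List (String × List (String × List (String × List Int)))) (window_size : Int) (threshold : Int), Dom_density_filter_snps group_positions_set window_size threshold → Pre_density_filter_snps group_positions_set window_size threshold → Spec_density_filter_snps group_positions_set window_size threshold (density_filter_snps group_positions_set window_size threshold)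

-- ===== LEMMAS AND PROOFS =====

-- 1) correctness of the hand-rolled bisect_left

theorem pvCountP_cut (a : List Int) (x : Int) (j : Nat) (hj : j ≤ a.length)
    (h1 : ∀ (i : Nat) (h : i < a.length), i < j → a[i] < x)
    (h2 : ∀ (i : Nat) (h : i < a.length), j ≤ i → x ≤ a[i]) :
    a.countP (fun y => decide (y < x)) = j := by
  conv_lhs => rw [← List.take_append_drop j a]
  rw [List.countP_append]
  have ht : (a.take j).countP (fun y => decide (y < x)) = (a.take j).length := by
    rw [List.countP_eq_length]
    intro y hy
    obtain ⟨i, hi, rfl⟩ := List.mem_iff_getElem.mp hy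
    have hi' : i < a.length := lt_of_lt_of_le (lt_of_lt_of_le hi (by simp)) le_rfl
    rw [List.getElem_take]
    simp only [decide_eq_true_eq]
    exact h1 i hi' (lt_of_lt_of_le hi (by simp [List.length_take]))
  have hd : (a.drop j).countP (fun y => decide (y < x)) = 0 := by
    rw [List.countP_eq_zero]
    intro y hy
    obtain ⟨i, hi, rfl⟩ := List.mem_iff_getElem.mp hy
    rw [List.getElem_drop]
    simp only [decide_eq_true_eq, not_lt]
    exact h2 (j + i) (by simp at hi; omega) (by omega)
  rw [ht, hd, List.length_take]
  omega

theorem pvBisectLoop_spec (a : List Int) (x : Int) (hs : a.Pairwise (· ≤ ·)) :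
    ∀ (fuel : Nat) (lo hi : Int), (hi - lo).toNat ≤ fuel → 0 ≤ lo → lo ≤ hi → hi ≤ (a.length : Int) →
    (∀ (i : Nat) (h : i < a.length), (i : Int) < lo → a[i] < x) →
    (∀ (i : Nat) (h : i < a.length), hi ≤ (i : Int) → x ≤ a[i]) →
    pvBisectLoop a x fuel lo hi = ((a.countP (fun y => decide (y < x)) : Nat) : Int) := by
  intro fuel
  induction fuel with
  | zero =>
      intro lo hi hn h0 hlh hhi hlow hhigh
      have : lo = hi := by omega
      subst this
      rw [show pvBisectLoop a x 0 lo lo = lo from rfl]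
      rw [pvCountP_cut a x lo.toNat (by omega) (fun i h hi => hlow i h (by omega))
            (fun i h hi => hhigh i h (by omega))]
      omega
  | succ n ih =>
      intro lo hi hn h0 hlh hhi hlow hhigh
      rw [pvBisectLoop]
      by_cases h : lo < hi
      · simp only [if_pos h]
        rw [PySem.Int.floordiv_eq_ediv_of_pos (show (0:Int) < 2 by norm_num)]
        set mid := (lo + hi) / 2 with hmid
        have hb1 : lo ≤ mid := by omega
        have hb2 : mid < hi := by omega
        have hmlen : mid < (a.length : Int) := by omega
        have hget : PySem.List.pyGetD a mid 0 = a[mid.toNat]'(by omega) :=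
          PySem.List.pyGetD_eq_getElem a 0 (by omega) (by omega)
        by_cases hcmp : PySem.List.pyGetD a mid 0 < x
        · simp only [if_pos hcmp]
          apply ih (mid + 1) hi (by omega) (by omega) (by omega) hhi
          · intro i hilen hi'
            rcases lt_or_ge (i : Int) mid with hlt | hge
            · rcases lt_or_ge (i : Int) lo with hlo | hge2
              · exact hlow i hilen hlo
              · have : a[i] ≤ a[mid.toNat]'(by omega) := by
                  rcases eq_or_lt_of_le (show i ≤ mid.toNat by omega) with heq | hlt2
                  · subst heq; exact le_rfl
                  · exact List.pairwise_iff_getElem.mp hs i mid.toNat hilen (by omega) hlt2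
                rw [hget] at hcmp
                omega
            · have : i = mid.toNat := by omega
              subst this
              rw [hget] at hcmp
              exact hcmp
          · exact hhigh
        · simp only [if_neg hcmp]
          push Not at hcmp
          apply ih lo mid (by omega) h0 (by omega) (by omega) hlow
          intro i hilen hi'
          rcases eq_or_lt_of_le (show mid.toNat ≤ i by omega) with heq | hlt2
          · have hieq : i = mid.toNat := heq.symm
            subst hieq
            rw [hget] at hcmp; exact hcmp
          · have : a[mid.toNat]'(by omega) ≤ a[i] :=
              List.pairwise_iff_getElem.mp hs mid.toNat i (by omega) hilen hlt2
            rw [hget] at hcmp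
            omega
      · simp only [if_neg h]
        have : lo = hi := by omega
        subst this
        rw [pvCountP_cut a x lo.toNat (by omega) (fun i hh hi => hlow i hh (by omega))
              (fun i hh hi => hhigh i hh (by omega))]
        omega

theorem pvBisectLeft_spec (a : List Int) (x : Int) (hs : a.Pairwise (· ≤ ·)) :
    pvBisectLeft a x = ((a.countP (fun y => decide (y < x)) : Nat) : Int) := by
  unfold pvBisectLeft
  exact pvBisectLoop_spec a x hs a.length 0 (a.length : Int) (by omega) le_rfl (by omega) le_rfl
    (fun i h hi => absurd hi (by omega)) (fun i h hi => absurd hi (by omega))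

-- 2) A's window count equals B's binary-search neighbour count

theorem pvCountP_split (l : List Int) (lo hi : Int) (h : lo ≤ hi) :
    l.countP (fun q => decide (q < hi)) =
      l.countP (fun q => decide (q < lo)) + l.countP (fun q => decide (lo ≤ q ∧ q < hi)) := by
  induction l with
  | nil => simp
  | cons y t ih =>
      simp only [List.countP_cons, ih, decide_eq_true_eq]
      split_ifs <;> omega

theorem pvCountEq (pos_list : List Int) (bp_range pos : Int) (hpos : pos ∈ pos_list) :
    pvACount pos_list bp_range pos =
      (if bp_range > 0 then
        pvBisectLeft (PySem.List.sorted (PySem.Set.ofList pos_list) (fun y => y) false) (pos + bp_range)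
          - pvBisectLeft (PySem.List.sorted (PySem.Set.ofList pos_list) (fun y => y) false) (pos - bp_range) - 1
      else 0) := by
  unfold pvACount
  have hfun : (fun (add_pos : Int) (i : Int) => if i ∈ pos_list ∧ i ≠ pos then add_pos + 1 else add_pos)
      = (fun (add_pos : Int) (i : Int) =>
          if (fun i => decide (i ∈ pos_list ∧ i ≠ pos)) i = true then add_pos + 1 else add_pos) := by
    funext acc i
    by_cases h : i ∈ pos_list ∧ i ≠ pos <;> simp [h]
  rw [hfun, PySem.List.foldl_count_if, zero_add]
  by_cases hbp : bp_range > 0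
  · rw [if_pos hbp]
    set srt := PySem.List.sorted (PySem.Set.ofList pos_list) (fun y => y) false with hsrt
    have hlt : srt.Pairwise (· < ·) := PySem.List.sorted_ofList_pairwise_lt pos_list
    have hle : srt.Pairwise (· ≤ ·) := hlt.imp (fun h => le_of_lt h)
    have hnd : srt.Nodup := hlt.imp (fun h => ne_of_lt h)
    have hmem : ∀ y : Int, y ∈ srt ↔ y ∈ pos_list := by
      intro y
      rw [hsrt, PySem.List.mem_sorted, PySem.Set.mem_ofList]
    rw [pvBisectLeft_spec srt _ hle, pvBisectLeft_spec srt _ hle]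
    have hsplit := pvCountP_split srt (pos - bp_range) (pos + bp_range) (by omega)
    -- the interval count on srt is the window count plus one (pos itself)
    have hperm : (srt.filter (fun q => decide (pos - bp_range ≤ q ∧ q < pos + bp_range))).Perm
        (pos :: (PySem.List.pyRange (pos - bp_range) (pos + bp_range) 1).filter
          (fun i => decide (i ∈ pos_list ∧ i ≠ pos))) := by
      rw [List.perm_ext_iff_of_nodup (hnd.filter _) ?_]
      · intro y
        simp only [List.mem_filter, List.mem_cons, PySem.List.mem_pyRange_one, hmem,
          decide_eq_true_eq]
        constructor
        · rintro ⟨hy, hb1, hb2⟩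
          by_cases hyp : y = pos
          · exact Or.inl hyp
          · exact Or.inr ⟨⟨hb1, hb2⟩, hy, hyp⟩
        · rintro (rfl | ⟨⟨hb1, hb2⟩, hy, hyp⟩)
          · exact ⟨hpos, by omega, by omega⟩
          · exact ⟨hy, hb1, hb2⟩
      · refine List.Nodup.cons ?_ ((PySem.List.nodup_pyRange_one _ _).filter _)
        simp [List.mem_filter]
    have hlen := hperm.length_eq
    simp only [List.length_cons] at hlen
    rw [List.countP_eq_length_filter] at hsplit ⊢
    rw [← List.countP_eq_length_filter, ← List.countP_eq_length_filter] at *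
    omega
  · rw [if_neg hbp]
    rw [PySem.List.pyRange_one_eq_nil (by omega)]
    simp

-- 3) localizing A's nested-dictionary fold (under Pre_'s distinct keys)

-- what A builds per chromosome, group and species, pulled out of the big dictionary
def pvASet (bp_range threshold : Int) (pos_list : List Int) : PySem.Set Int :=
  pos_list.foldl (fun s pos => if pvACount pos_list bp_range pos ≤ threshold then PySem.Set.add s pos else s)
    PySem.Set.empty

def pvAGDict (bp_range threshold : Int) (rd : List (String × List Int)) : pvD1 :=
  rd.foldl (fun y rc => y.insert rc.1 (pvASet bp_range threshold rc.2)) PySem.Dict.empty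

def pvASDict (bp_range threshold : Int) (gd : List (String × List (String × List Int))) : pvD2 :=
  gd.foldl (fun x q => x.insert q.1 (pvAGDict bp_range threshold q.2)) PySem.Dict.empty

-- modify on a freshly inserted key rewrites that entry in place
theorem pvModifyInsert {κ ν : Type} [BEq κ] [LawfulBEq κ] (base : PySem.Dict κ ν) (k : κ) (v d0 : ν) (f : ν → ν) :
    (base.insert k v).modify k d0 f = base.insert k (f v) := by
  simp [PySem.Dict.modify, PySem.Dict.getD_insert_self, PySem.Dict.insert_insert_self]

theorem pvAPosFold (bp_range threshold : Int) (sp g c : String) (pl pl' : List Int)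
    (base : pvD3) (x : pvD2) (y : pvD1) (s : PySem.Set Int) :
    pl.foldl (pvAPos bp_range threshold sp g c pl') (base.insert sp (x.insert g (y.insert c s)))
      = base.insert sp (x.insert g (y.insert c
          (pl.foldl (fun s pos => if pvACount pl' bp_range pos ≤ threshold then PySem.Set.add s pos else s) s))) := by
  induction pl generalizing s with
  | nil => simp
  | cons pos t ih =>
      simp only [List.foldl_cons]
      by_cases hc : pvACount pl' bp_range pos ≤ threshold
      · rw [show pvAPos bp_range threshold sp g c pl' (base.insert sp (x.insert g (y.insert c s))) pos
              = base.insert sp (x.insert g (y.insert c (PySem.Set.add s pos))) from by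
            unfold pvAPos
            rw [if_pos hc, pvModifyInsert, pvModifyInsert, pvModifyInsert]]
        rw [ih, if_pos hc]
      · rw [show pvAPos bp_range threshold sp g c pl' (base.insert sp (x.insert g (y.insert c s))) pos
              = base.insert sp (x.insert g (y.insert c s)) from by
            unfold pvAPos; rw [if_neg hc]]
        rw [ih, if_neg hc]

theorem pvAChromFold (bp_range threshold : Int) (sp g : String)
    (rd : List (String × List Int)) (base : pvD3) (x : pvD2) (y : pvD1)
    (hnd : (rd.map Prod.fst).Nodup) (hfresh : ∀ c ∈ rd.map Prod.fst, y.contains c = false) :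
    rd.foldl (pvAChrom bp_range threshold sp g) (base.insert sp (x.insert g y))
      = base.insert sp (x.insert g (rd.foldl (fun y rc => y.insert rc.1 (pvASet bp_range threshold rc.2)) y)) := by
  induction rd generalizing y with
  | nil => simp
  | cons rc t ih =>
      simp only [List.foldl_cons]
      have hfr : y.contains rc.1 = false := hfresh rc.1 (by simp)
      have hstep : pvAChrom bp_range threshold sp g (base.insert sp (x.insert g y)) rc
          = base.insert sp (x.insert g (y.insert rc.1 (pvASet bp_range threshold rc.2))) := by
        unfold pvAChrom
        rw [PySem.Dict.getD_insert_self, PySem.Dict.getD_insert_self, hfr]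
        simp only [Bool.not_false, if_pos]
        rw [pvModifyInsert, pvModifyInsert]
        exact pvAPosFold bp_range threshold sp g rc.1 rc.2 rc.2 base x y PySem.Set.empty
      rw [hstep]
      have hnd2 := hnd
      rw [List.map_cons, List.nodup_cons] at hnd2
      obtain ⟨h1, h2⟩ := hnd2
      refine ih _ h2 ?_
      intro c hc
      rw [PySem.Dict.contains_insert]
      have hne : c ≠ rc.1 := by rintro rfl; exact h1 hc
      simp [hne, hfresh c (by simp [hc])]

theorem pvAGroupFold (bp_range threshold : Int) (sp : String)
    (gd : List (String × List (String × List Int))) (base : pvD3) (x : pvD2)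
    (hnd : (gd.map Prod.fst).Nodup) (hfresh : ∀ g ∈ gd.map Prod.fst, x.contains g = false)
    (hinner : ∀ q ∈ gd, (q.2.map Prod.fst).Nodup) :
    gd.foldl (pvAGroup bp_range threshold sp) (base.insert sp x)
      = base.insert sp (gd.foldl (fun x q => x.insert q.1 (pvAGDict bp_range threshold q.2)) x) := by
  induction gd generalizing x with
  | nil => simp
  | cons gr t ih =>
      simp only [List.foldl_cons]
      have hstep : pvAGroup bp_range threshold sp (base.insert sp x) gr
          = base.insert sp (x.insert gr.1 (pvAGDict bp_range threshold gr.2)) := by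
        unfold pvAGroup pvAGDict
        rw [pvModifyInsert]
        exact pvAChromFold bp_range threshold sp gr.1 gr.2 base x
          PySem.Dict.empty (hinner gr (by simp)) (fun c _ => PySem.Dict.contains_empty c)
      rw [hstep]
      have hnd2 := hnd
      rw [List.map_cons, List.nodup_cons] at hnd2
      obtain ⟨h1, h2⟩ := hnd2
      refine ih _ h2 ?_ ?_
      · intro g hg
        rw [PySem.Dict.contains_insert]
        have hne : g ≠ gr.1 := by rintro rfl; exact h1 hg
        simp [hne, hfresh g (by simp [hg])]
      · intro q hq
        exact hinner q (by simp [hq])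

theorem pvASpeciesFold (bp_range threshold : Int)
    (gps : List (String × List (String × List (String × List Int)))) (f : pvD3)
    (hnd : (gps.map Prod.fst).Nodup)
    (hfresh : ∀ s ∈ gps.map Prod.fst, f.contains s = false)
    (hinner : ∀ p ∈ gps, (p.2.map Prod.fst).Nodup ∧ ∀ q ∈ p.2, (q.2.map Prod.fst).Nodup) :
    gps.foldl (pvASpecies bp_range threshold) f
      = gps.foldl (fun f p => f.insert p.1 (pvASDict bp_range threshold p.2)) f := by
  induction gps generalizing f with
  | nil => simp
  | cons p t ih =>
      simp only [List.foldl_cons]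
      have hstep : pvASpecies bp_range threshold f p
          = f.insert p.1 (pvASDict bp_range threshold p.2) := by
        unfold pvASpecies pvASDict
        exact pvAGroupFold bp_range threshold p.1 p.2 f PySem.Dict.empty
          (hinner p (by simp)).1 (fun g _ => PySem.Dict.contains_empty g)
          (fun q hq => (hinner p (by simp)).2 q hq)
      rw [hstep]
      have hnd2 := hnd
      rw [List.map_cons, List.nodup_cons] at hnd2
      obtain ⟨h1, h2⟩ := hnd2
      refine ih _ h2 ?_ ?_
      · intro sk hs
        rw [PySem.Dict.contains_insert]
        have hne : sk ≠ p.1 := by rintro rfl; exact h1 hs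
        simp [hne, hfresh sk (by simp [hs])]
      · intro q hq
        exact hinner q (by simp [hq])

-- 4) per chromosome: A's localized set equals Source B's filter_chrom

theorem pvASet_eq (bp_range threshold : Int) (pos_list : List Int) :
    pvASet bp_range threshold pos_list = pvFilterChrom bp_range threshold pos_list := by
  unfold pvASet pvFilterChrom
  refine PySem.List.foldl_congr_mem _ _ _ _ ?_
  intro acc pos hmem
  rw [pvCountEq pos_list bp_range pos hmem]

-- ===== VERDICT (by name: the statement is the Claim_ definition above) =====
theorem density_filter_snps_spec : Claim_equal_density_filter_snps := by
  intro gps w t _hdom hpre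
  obtain ⟨hnd, hinner⟩ := hpre
  unfold Spec_density_filter_snps
  simp only [density_filter_snps, density_filter_snps_alt]
  rw [pvASpeciesFold (PySem.Int.truncdiv w 2) t gps PySem.Dict.empty hnd
        (fun s _ => PySem.Dict.contains_empty s) hinner]
  rw [PySem.Dict.items_foldl_insert_fresh gps Prod.fst
        (fun p => pvASDict (PySem.Int.truncdiv w 2) t p.2) PySem.Dict.empty
        (fun a _ => PySem.Dict.contains_empty _) hnd]
  simp only [PySem.Dict.empty, List.nil_append, List.map_map]
  refine List.map_congr_left ?_
  intro p hp
  simp only [Function.comp]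
  refine congrArg (fun z => (p.1, z)) ?_
  unfold pvASDict
  rw [PySem.Dict.items_foldl_insert_fresh p.2 Prod.fst
        (fun q => pvAGDict (PySem.Int.truncdiv w 2) t q.2) PySem.Dict.empty
        (fun a _ => PySem.Dict.contains_empty _) (hinner p hp).1]
  simp only [PySem.Dict.empty, List.nil_append, List.map_map]
  refine List.map_congr_left ?_
  intro q hq
  simp only [Function.comp]
  refine congrArg (fun z => (q.1, z)) ?_
  unfold pvAGDict
  rw [PySem.Dict.items_foldl_insert_fresh q.2 Prod.fst
        (fun r => pvASet (PySem.Int.truncdiv w 2) t r.2) PySem.Dict.empty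
        (fun a _ => PySem.Dict.contains_empty _) ((hinner p hp).2 q hq)]
  simp only [PySem.Dict.empty, List.nil_append, List.map_map]
  refine List.map_congr_left ?_
  intro r _
  simp only [Function.comp]
  rw [pvASet_eq]
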